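-- pv_equiv track=rewrite | github.com/Rvelamen/Octopus | backend/extensions/desktop_handlers.py | _sanitize_plugin_name
-- ===== SOURCE A (Python) =====
-- def _sanitize_plugin_name(name: str) -> str:
--     """Sanitize plugin name for directory."""
--     unsafe = '<>:"/\\|?*'
--     for char in unsafe:
--         name = name.replace(char, "_")
--     name = name.strip().strip(".")
--     if not name:
--         name = "unnamed_plugin"
--     return name
-- ===== SOURCE B (Python) =====
-- def _sanitize_plugin_name(name: str) -> str:
--     """Sanitize plugin name for directory: one pass over the characters,
--     then explicit pop-based trimming of whitespace and dots at both ends."""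
--     out = ['_' if c in '<>:"/\\|?*' else c for c in name]
--     while out and out[0].isspace():
--         out.pop(0)
--     while out and out[-1].isspace():
--         out.pop()
--     while out and out[0] == '.':
--         out.pop(0)
--     while out and out[-1] == '.':
--         out.pop()
--     return ''.join(out) or 'unnamed_plugin'
-- ===== Notes on version B (the rewrite author's own statement) =====
-- stated objective: alternative
-- what changed: A rewrites the whole string nine times (one str.replace per forbidden character) and then trims with library strip()/strip('.'); B builds the character list in a single pass mapping forbidden characters to an underscore, and trims both ends itself with explicit pop-based while loops instead of the staged library strips.
import Mathlib
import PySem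

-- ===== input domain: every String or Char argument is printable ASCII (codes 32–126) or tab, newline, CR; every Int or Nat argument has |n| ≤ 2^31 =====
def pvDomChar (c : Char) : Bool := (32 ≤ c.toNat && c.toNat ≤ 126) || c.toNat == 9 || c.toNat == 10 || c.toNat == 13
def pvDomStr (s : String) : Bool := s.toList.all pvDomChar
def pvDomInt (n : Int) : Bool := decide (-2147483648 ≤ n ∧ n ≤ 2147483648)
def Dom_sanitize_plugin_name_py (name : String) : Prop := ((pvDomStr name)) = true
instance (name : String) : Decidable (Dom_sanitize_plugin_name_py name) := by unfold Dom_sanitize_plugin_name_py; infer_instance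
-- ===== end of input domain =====

-- B builds the sanitized character list in one pass (mapping forbidden characters to '_') and
-- trims whitespace and dots from both ends with explicit recursion, instead of A's nine
-- str.replace passes followed by library strip()/strip('.') (objective: alternative).


-- ===== PORT A =====
-- for char in the forbidden set: name = name.replace(char, "_"); then strip(), strip('.'), default
def sanitize_plugin_name_py (name : String) : String :=
  let badChars : List Char := "<>:\"/\\|?*".toList
  let name1 := badChars.foldl (fun n c => PySem.Str.replace n (String.ofList [c]) "_") name
  let name2 := PySem.Str.stripChars (PySem.Str.strip name1) "."
  if name2 = "" then "unnamed_plugin" else name2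

-- ===== PORT B =====
-- "while out and p(out[0]): out.pop(0)" as structural recursion on the front of the list
def pvTrim (p : Char → Bool) : List Char → List Char
  | [] => []
  | c :: t => if p c then pvTrim p t else c :: t

-- comprehension pass ('_' if c in '<>:"/\\|?*' else c), then the four pop-based while loops
-- (popping from the back = trimming the front of the reversed list), then join-or-default
def sanitize_plugin_name_py_alt (name : String) : String :=
  let out := name.toList.map (fun c => if ("<>:\"/\\|?*".toList).contains c then '_' else c)
  let out1 := pvTrim PySem.Chars.isspace out
  let out2 := (pvTrim PySem.Chars.isspace out1.reverse).reverse
  let out3 := pvTrim (· == '.') out2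
  let out4 := (pvTrim (· == '.') out3.reverse).reverse
  if out4.isEmpty then "unnamed_plugin" else String.ofList out4

-- ===== PRECONDITION & SPEC =====
def Spec_sanitize_plugin_name_py (name : String) (out : String) : Prop := out = sanitize_plugin_name_py_alt name
instance (name : String) (out : String) : Decidable (Spec_sanitize_plugin_name_py name out) := by unfold Spec_sanitize_plugin_name_py; infer_instance

-- ===== CLAIM (what is proved, stated in full; the proofs are below) =====
def Claim_equal_sanitize_plugin_name_py : Prop := ∀ (name : String), Dom_sanitize_plugin_name_py name → Spec_sanitize_plugin_name_py name (sanitize_plugin_name_py name)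

-- ===== LEMMAS AND PROOFS =====

-- replace with a single-character pattern is a map over the characters
theorem pv_go_single (c d : Char) : ∀ (l acc : List Char) (fuel : Nat), l.length ≤ fuel →
    PySem.Chars.replace.go [c] [d] fuel l acc = acc.reverse ++ l.map (fun x => if x = c then d else x) := by
  intro l
  induction l with
  | nil => intro acc fuel _; cases fuel <;> simp [PySem.Chars.replace.go]
  | cons h t ih =>
    intro acc fuel hf
    cases fuel with
    | zero => exact absurd hf (by simp)
    | succ n =>
      rw [PySem.Chars.replace.go]
      by_cases hc : h = c
      · subst hc
        rw [if_pos (by simp)]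
        rw [show List.drop [h].length (h :: t) = t from rfl]
        rw [ih _ n (by simpa using hf)]
        simp
      · rw [if_neg (by simp [List.isPrefixOf]; exact fun e => hc e.symm)]
        rw [ih _ n (by simpa using hf)]
        simp [hc]

theorem pv_replace_single (cs : List Char) (c d : Char) :
    PySem.Chars.replace cs [c] [d] = cs.map (fun x => if x = c then d else x) := by
  simp [PySem.Chars.replace, pv_go_single c d cs [] cs.length le_rfl]

-- A's nine replace passes amount to B's one membership-test map
theorem pv_fold_eq_map (s : String) :
    ("<>:\"/\\|?*".toList.foldl (fun n c => PySem.Str.replace n (String.ofList [c]) "_") s).toList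
      = s.toList.map (fun c => if ("<>:\"/\\|?*".toList).contains c then '_' else c) := by
  have hund : "_".toList = ['_'] := by simp
  have hu : "<>:\"/\\|?*".toList = ['<','>',':','"','/','\\','|','?','*'] := by simp
  rw [hu]
  simp only [List.foldl_cons, List.foldl_nil, PySem.Str.toList_replace, String.toList_ofList,
    hund, pv_replace_single, List.map_map]
  refine List.map_congr_left (fun x _ => ?_)
  by_cases hx : x ∈ (['<','>',':','"','/','\\','|','?','*'] : List Char)
  · fin_cases hx <;> decide
  · simp only [List.mem_cons, List.not_mem_nil, or_false] at hx
    push Not at hx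
    obtain ⟨n1,n2,n3,n4,n5,n6,n7,n8,n9⟩ := hx
    simp [Function.comp_apply, List.contains, List.elem, beq_eq_decide, n1,n2,n3,n4,n5,n6,n7,n8,n9]

-- B's pop loop is dropWhile
theorem pv_trim_eq_dropWhile (p : Char → Bool) (l : List Char) :
    pvTrim p l = l.dropWhile p := by
  induction l with
  | nil => rfl
  | cons c t ih => by_cases h : p c <;> simp [pvTrim, List.dropWhile, h, ih]

-- the common tail: default on empty, identity otherwise, across the String/List views
theorem pv_tail (s : String) (X : List Char) (h : s.toList = X) :
    (if s = "" then "unnamed_plugin" else s)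
      = (if X.isEmpty then "unnamed_plugin" else String.ofList X) := by
  subst h
  by_cases hs : s = ""
  · subst hs; simp
  · rw [if_neg hs, if_neg (by simp [List.isEmpty_iff, String.toList_eq_nil_iff, hs]),
      String.ofList_toList]

-- ===== VERDICT (by name: the statement is the Claim_ definition above) =====
theorem sanitize_plugin_name_py_spec : Claim_equal_sanitize_plugin_name_py := by
  intro name _
  unfold Spec_sanitize_plugin_name_py sanitize_plugin_name_py sanitize_plugin_name_py_alt
  simp only [pv_trim_eq_dropWhile]
  have hdot : (fun c : Char => c == '.') = (fun c => (['.'] : List Char).contains c) := by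
    funext c; simp only [List.contains, List.elem]; cases c == '.' <;> rfl
  have hdotl : (".":String).toList = ['.'] := by simp
  set A := "<>:\"/\\|?*".toList.foldl (fun n c => PySem.Str.replace n (String.ofList [c]) "_") name with hA
  have hkey : (PySem.Str.stripChars (PySem.Str.strip A) ".").toList
      = ((((A.toList.dropWhile PySem.Chars.isspace).reverse.dropWhile
            PySem.Chars.isspace).reverse.dropWhile (· == '.')).reverse.dropWhile
            (· == '.')).reverse := by
    simp only [PySem.Str.toList_stripChars, PySem.Str.toList_strip, hdotl,
      PySem.Chars.stripChars, PySem.Chars.strip, PySem.Chars.lstrip, PySem.Chars.rstrip, hdot]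
  rw [pv_fold_eq_map name] at hkey
  exact pv_tail _ _ hkey
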